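-- pv_equiv track=rewrite | github.com/moaxey/OSXWIndowHalving | get_window_and_resize.py | screenlist_to_desktop
-- ===== SOURCE A (Python) =====
-- def screenlist_to_desktop(screenlist):
--     if len(screenlist) == 1:
--         return screenlist[0]
--     desktop_bounds = [0, 0, 0, 0]
--     for screen in screenlist:
--         if screen[0] < desktop_bounds[0]:
--             desktop_bounds[0] = screen[0]
--         if screen[1] < desktop_bounds[1]:
--             desktop_bounds[1] = screen[1]
--         if screen[2] > desktop_bounds[2]:
--             desktop_bounds[2] = screen[2]
--         if screen[3] > desktop_bounds[3]:
--             desktop_bounds[3] = screen[3]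
--     if desktop_bounds[0] < 0:
--         shiftx = abs(desktop_bounds[0])
--     else:
--         shiftx = 0
--     desktop_bounds[0] += shiftx
--     desktop_bounds[2] += shiftx
--     if desktop_bounds[1] < 0:
--         shifty = abs(desktop_bounds[1])
--     else:
--         shifty = 0
--     desktop_bounds[1] += shifty
--     desktop_bounds[3] += shifty
--     return desktop_bounds
-- ===== SOURCE B (Python) =====
-- def _bbox(screenlist, lo, hi):
--     # divide-and-conquer bounding box of screenlist[lo:hi] (hi - lo >= 1)
--     if hi - lo <= 1:
--         s = screenlist[lo]
--         return (s[0], s[1], s[2], s[3])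
--     mid = (lo + hi) // 2
--     l = _bbox(screenlist, lo, mid)
--     r = _bbox(screenlist, mid, hi)
--     return (min(l[0], r[0]), min(l[1], r[1]),
--             max(l[2], r[2]), max(l[3], r[3]))
--
--
-- def screenlist_to_desktop(screenlist):
--     if len(screenlist) == 1:
--         return screenlist[0]
--     if screenlist:
--         b = _bbox(screenlist, 0, len(screenlist))
--         mnx, mny = min(b[0], 0), min(b[1], 0)
--         mxx, mxy = max(b[2], 0), max(b[3], 0)
--     else:
--         mnx = mny = mxx = mxy = 0
--     return [0, 0, mxx - mnx, mxy - mny]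
-- ===== Notes on version B (the rewrite author's own statement) =====
-- stated objective: alternative
-- what changed: Replaces A's single mutate-bounds-then-shift loop with a divide-and-conquer recursion that halves the list, merges the two half bounding boxes componentwise, then clamps the box against the origin and returns [0, 0, width, height] directly, dropping the shift branch.
import Mathlib
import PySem

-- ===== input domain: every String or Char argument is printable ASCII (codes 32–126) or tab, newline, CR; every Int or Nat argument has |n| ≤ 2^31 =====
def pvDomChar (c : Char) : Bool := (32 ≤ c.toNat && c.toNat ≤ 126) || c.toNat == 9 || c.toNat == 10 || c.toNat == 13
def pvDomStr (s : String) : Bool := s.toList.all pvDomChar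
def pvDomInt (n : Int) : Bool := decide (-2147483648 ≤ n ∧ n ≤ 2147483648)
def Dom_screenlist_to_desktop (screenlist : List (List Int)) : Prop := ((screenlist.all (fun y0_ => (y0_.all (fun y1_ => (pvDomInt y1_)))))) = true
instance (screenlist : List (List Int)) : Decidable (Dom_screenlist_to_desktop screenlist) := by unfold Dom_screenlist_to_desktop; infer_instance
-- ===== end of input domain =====

-- B replaces A's mutate-bounds-then-shift loop with a divide-and-conquer recursion that
-- merges half bounding boxes and clamps against the origin (objective: alternative).

-- ===== PORT A =====
-- screen[i] under Pre_ is always in range; the getD 0 default is never reached there.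
def pvGetI (s : List Int) (i : Int) : Int := (PySem.List.pyGet? s i).getD 0

def screenlist_to_desktop (screenlist : List (List Int)) : List Int :=
  if screenlist.length = 1 then (PySem.List.pyGet? screenlist 0).getD []
  else
    let b := screenlist.foldl
      (fun (b : Int × Int × Int × Int) screen =>
        let b0 := if pvGetI screen 0 < b.1 then pvGetI screen 0 else b.1
        let b1 := if pvGetI screen 1 < b.2.1 then pvGetI screen 1 else b.2.1
        let b2 := if pvGetI screen 2 > b.2.2.1 then pvGetI screen 2 else b.2.2.1
        let b3 := if pvGetI screen 3 > b.2.2.2 then pvGetI screen 3 else b.2.2.2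
        (b0, b1, b2, b3))
      (0, 0, 0, 0)
    let shiftx := if b.1 < 0 then |b.1| else 0
    let shifty := if b.2.1 < 0 then |b.2.1| else 0
    [b.1 + shiftx, b.2.1 + shifty, b.2.2.1 + shiftx, b.2.2.2 + shifty]

-- ===== PORT B =====
-- _bbox: divide-and-conquer bounding box of screenlist[lo:hi] (as in Source B).
-- The fuel argument is only a structural totality guard: any fuel ≥ hi - lo
-- (callers pass screenlist.length) makes the recursion identical to Source B's _bbox.
def pvBBox (screenlist : List (List Int)) : Nat → Nat → Nat → Int × Int × Int × Int
  | 0, _, _ => (0, 0, 0, 0)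
  | fuel + 1, lo, hi =>
    if hi - lo ≤ 1 then
      let s := (PySem.List.pyGet? screenlist (lo : Int)).getD []
      (pvGetI s 0, pvGetI s 1, pvGetI s 2, pvGetI s 3)
    else
      let mid := (lo + hi) / 2
      let l := pvBBox screenlist fuel lo mid
      let r := pvBBox screenlist fuel mid hi
      (min l.1 r.1, min l.2.1 r.2.1, max l.2.2.1 r.2.2.1, max l.2.2.2 r.2.2.2)

def screenlist_to_desktop_alt (screenlist : List (List Int)) : List Int :=
  if screenlist.length = 1 then (PySem.List.pyGet? screenlist 0).getD []
  else
    let e :=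
      if screenlist.isEmpty then ((0 : Int), (0 : Int), (0 : Int), (0 : Int))
      else
        let b := pvBBox screenlist screenlist.length 0 screenlist.length
        (min b.1 0, min b.2.1 0, max b.2.2.1 0, max b.2.2.2 0)
    [0, 0, e.2.2.1 - e.1, e.2.2.2 - e.2.1]

-- ===== PRECONDITION & SPEC =====
-- Pre_ excludes exactly the inputs where A raises IndexError: some screen shorter
-- than 4 entries while len(screenlist) ≠ 1 (the len==1 branch never indexes into the screen).
def Pre_screenlist_to_desktop (screenlist : List (List Int)) : Prop :=
  screenlist.length = 1 ∨ ∀ s ∈ screenlist, 4 ≤ s.length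
instance (screenlist : List (List Int)) : Decidable (Pre_screenlist_to_desktop screenlist) := by
  unfold Pre_screenlist_to_desktop; infer_instance

def pvWitness_screenlist_to_desktop : List (List Int) := [[-3, -2, 5, 4], [1, 0, 9, 6]]

def Spec_screenlist_to_desktop (screenlist : List (List Int)) (out : List Int) : Prop := out = screenlist_to_desktop_alt screenlist
instance (screenlist : List (List Int)) (out : List Int) : Decidable (Spec_screenlist_to_desktop screenlist out) := by unfold Spec_screenlist_to_desktop; infer_instance

-- ===== CLAIM (what is proved, stated in full; the proofs are below) =====
def Claim_equal_screenlist_to_desktop : Prop := ∀ (screenlist : List (List Int)), Dom_screenlist_to_desktop screenlist → Pre_screenlist_to_desktop screenlist → Spec_screenlist_to_desktop screenlist (screenlist_to_desktop screenlist)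

-- ===== LEMMAS AND PROOFS =====

-- A's fold computes the four zero-seeded min/max extents componentwise.
theorem foldA_eq (l : List (List Int)) (a0 a1 a2 a3 : Int) :
    l.foldl
      (fun (b : Int × Int × Int × Int) screen =>
        let b0 := if pvGetI screen 0 < b.1 then pvGetI screen 0 else b.1
        let b1 := if pvGetI screen 1 < b.2.1 then pvGetI screen 1 else b.2.1
        let b2 := if pvGetI screen 2 > b.2.2.1 then pvGetI screen 2 else b.2.2.1
        let b3 := if pvGetI screen 3 > b.2.2.2 then pvGetI screen 3 else b.2.2.2
        (b0, b1, b2, b3))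
      (a0, a1, a2, a3)
    = ((l.map (fun s => pvGetI s 0)).foldl min a0,
       (l.map (fun s => pvGetI s 1)).foldl min a1,
       (l.map (fun s => pvGetI s 2)).foldl max a2,
       (l.map (fun s => pvGetI s 3)).foldl max a3) := by
  induction l generalizing a0 a1 a2 a3 with
  | nil => rfl
  | cons s t ih =>
    simp only [List.foldl_cons, List.map_cons]
    have e0 : (if pvGetI s 0 < a0 then pvGetI s 0 else a0) = min a0 (pvGetI s 0) := by
      simp only [min_def]; split_ifs <;> omega
    have e1 : (if pvGetI s 1 < a1 then pvGetI s 1 else a1) = min a1 (pvGetI s 1) := by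
      simp only [min_def]; split_ifs <;> omega
    have e2 : (if pvGetI s 2 > a2 then pvGetI s 2 else a2) = max a2 (pvGetI s 2) := by
      simp only [max_def]; split_ifs <;> omega
    have e3 : (if pvGetI s 3 > a3 then pvGetI s 3 else a3) = max a3 (pvGetI s 3) := by
      simp only [max_def]; split_ifs <;> omega
    rw [e0, e1, e2, e3, ih]

-- pvBBox computes the componentwise min/max over the segment screenlist[lo:hi]:
-- folding over the segment from any seed equals combining the seed with the bbox component.
def pvBBoxP (sl : List (List Int)) (fuel lo hi : Nat) : Prop :=
    (∀ a : Int, (((sl.drop lo).take (hi - lo)).map (fun s => pvGetI s 0)).foldl min a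
        = min a (pvBBox sl fuel lo hi).1) ∧
    (∀ a : Int, (((sl.drop lo).take (hi - lo)).map (fun s => pvGetI s 1)).foldl min a
        = min a (pvBBox sl fuel lo hi).2.1) ∧
    (∀ a : Int, (((sl.drop lo).take (hi - lo)).map (fun s => pvGetI s 2)).foldl max a
        = max a (pvBBox sl fuel lo hi).2.2.1) ∧
    (∀ a : Int, (((sl.drop lo).take (hi - lo)).map (fun s => pvGetI s 3)).foldl max a
        = max a (pvBBox sl fuel lo hi).2.2.2)

theorem bbox_fold (sl : List (List Int)) : ∀ (fuel lo hi : Nat), hi - lo ≤ fuel →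
    lo < hi → hi ≤ sl.length → pvBBoxP sl fuel lo hi := by
  intro fuel
  induction fuel with
  | zero => intro lo hi hn h1 _; omega
  | succ n ih =>
    intro lo hi hn h1 h2
    unfold pvBBoxP
    by_cases hle : hi - lo ≤ 1
    · have hhi : hi = lo + 1 := by omega
      have hlt : lo < sl.length := by omega
      have hseg : (sl.drop lo).take (hi - lo) = [sl[lo]] := by
        rw [hhi]; simp only [Nat.add_sub_cancel_left]
        rw [List.drop_eq_getElem_cons hlt]; rfl
      have hget : (PySem.List.pyGet? sl (lo : Int)).getD [] = sl[lo] := by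
        rw [PySem.List.pyGet?_natCast, List.getElem?_eq_getElem hlt]; rfl
      rw [pvBBox, if_pos hle]
      simp only [hget, hseg]
      refine ⟨?_, ?_, ?_, ?_⟩ <;> intro a <;>
        simp only [List.map_cons, List.map_nil, List.foldl_cons, List.foldl_nil]
    · obtain ⟨L0, L1, L2, L3⟩ := ih lo ((lo + hi) / 2) (by omega) (by omega) (by omega)
      obtain ⟨R0, R1, R2, R3⟩ := ih ((lo + hi) / 2) hi (by omega) (by omega) h2
      have hseg : (sl.drop lo).take (hi - lo)
          = (sl.drop lo).take ((lo + hi) / 2 - lo) ++ (sl.drop ((lo + hi) / 2)).take (hi - (lo + hi) / 2) := by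
        have h : hi - lo = ((lo + hi) / 2 - lo) + (hi - (lo + hi) / 2) := by omega
        rw [h, List.take_add, List.drop_drop,
          show lo + ((lo + hi) / 2 - lo) = (lo + hi) / 2 from by omega]
      rw [pvBBox, if_neg hle]
      refine ⟨?_, ?_, ?_, ?_⟩ <;> intro a <;>
        rw [hseg, List.map_append, List.foldl_append]
      · rw [L0, R0, min_assoc]
      · rw [L1, R1, min_assoc]
      · rw [L2, R2, max_assoc]
      · rw [L3, R3, max_assoc]

-- ===== VERDICT (by name: the statement is the Claim_ definition above) =====
theorem screenlist_to_desktop_spec : Claim_equal_screenlist_to_desktop := by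
  intro l _ _
  unfold Spec_screenlist_to_desktop screenlist_to_desktop screenlist_to_desktop_alt
  by_cases h : l.length = 1
  · rw [if_pos h, if_pos h]
  · simp only [h, if_false]
    rw [foldA_eq]
    match l with
    | [] => decide
    | s :: t =>
      have hne : ((s :: t).isEmpty = true) = False := by simp
      have hB := bbox_fold (s :: t) (s :: t).length 0 (s :: t).length (by omega) (by simp) le_rfl
      unfold pvBBoxP at hB
      obtain ⟨B0, B1, B2, B3⟩ := hB
      simp only [List.drop_zero, Nat.sub_zero, List.take_length] at B0 B1 B2 B3
      simp only [hne, if_false, B0, B1, B2, B3]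
      generalize (pvBBox (s :: t) (s :: t).length 0 (s :: t).length).1 = c0 at B0 ⊢
      generalize (pvBBox (s :: t) (s :: t).length 0 (s :: t).length).2.1 = c1 at B1 ⊢
      generalize (pvBBox (s :: t) (s :: t).length 0 (s :: t).length).2.2.1 = c2 at B2 ⊢
      generalize (pvBBox (s :: t) (s :: t).length 0 (s :: t).length).2.2.2 = c3 at B3 ⊢
      clear B0 B1 B2 B3
      have a0 : |min (0 : Int) c0| = -(min (0 : Int) c0) := abs_of_nonpos (min_le_left _ _)
      have a1 : |min (0 : Int) c1| = -(min (0 : Int) c1) := abs_of_nonpos (min_le_left _ _)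
      rw [a0, a1]
      simp only [List.cons.injEq, and_true]
      refine ⟨?_, ?_, ?_, ?_⟩ <;> split_ifs <;> omega
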